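-- pv_equiv track=rewrite | github.com/Citric-ML/projectHermes | arduino_comms.py | separate_chunks
-- ===== SOURCE A (Python) =====
-- def separate_chunks(path):
--     if len(path) < 2:
--         return []
--
--     chunks = []
--     current_chunk = [path[0]]
--
--     prev_dx = path[1][0] - path[0][0]
--     prev_dy = path[1][1] - path[0][1]
--
--     for i in range(1, len(path)):
--         dx = path[i][0] - path[i-1][0]
--         dy = path[i][1] - path[i-1][1]
--
--         if (dx, dy) == (prev_dx, prev_dy):
--             current_chunk.append(path[i])
--         else:
--             chunks.append((current_chunk, prev_dx, prev_dy))
--             current_chunk = [path[i-1], path[i]]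
--             prev_dx, prev_dy = dx, dy
--
--     chunks.append((current_chunk, prev_dx, prev_dy))
--     return chunks
-- ===== SOURCE B (Python) =====
-- def separate_chunks(path):
--     out = []
--     n = len(path)
--     i = 0
--     while i + 1 < n:
--         dx = path[i + 1][0] - path[i][0]
--         dy = path[i + 1][1] - path[i][1]
--         j = i + 1
--         while j + 1 < n and path[j + 1][0] - path[j][0] == dx and path[j + 1][1] - path[j][1] == dy:
--             j += 1
--         out.append((path[i:j + 1], dx, dy))
--         i = j
--     return out
-- ===== Notes on version B (the rewrite author's own statement) =====
-- stated objective: alternative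
-- what changed: Replaced A's single-pass accumulator (growing current_chunk and flushing it on direction change) by an outer loop per chunk with an inner maximal-run scan that emits each chunk as a slice path[i:j+1].
import Mathlib
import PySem

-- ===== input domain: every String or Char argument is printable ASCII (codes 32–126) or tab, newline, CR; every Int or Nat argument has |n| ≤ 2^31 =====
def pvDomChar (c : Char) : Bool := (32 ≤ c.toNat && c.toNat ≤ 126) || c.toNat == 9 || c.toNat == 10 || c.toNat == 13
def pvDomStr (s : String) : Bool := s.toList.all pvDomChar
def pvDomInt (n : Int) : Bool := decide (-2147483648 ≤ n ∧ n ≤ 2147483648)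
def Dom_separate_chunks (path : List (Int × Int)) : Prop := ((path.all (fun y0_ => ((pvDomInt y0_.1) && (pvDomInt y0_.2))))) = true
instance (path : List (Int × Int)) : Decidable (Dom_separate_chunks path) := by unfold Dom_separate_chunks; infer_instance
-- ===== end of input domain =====

-- B is an alternative decomposition (outer loop per chunk + inner maximal-run scan with slicing)
-- of A's single-pass accumulator; same cost, no speed claim.

-- ===== PORT A =====
-- A's for-loop over i = 1 .. len(path)-1 (using path[i] and path[i-1]) is transcribed as the
-- obvious structural recursion over consecutive elements, with the same state
-- (chunks, current_chunk, prev_dx, prev_dy); 'a' is path[i-1], 'rest' the remaining path[i:].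
def aLoop (chunks : List ((List (Int × Int)) × Int × Int)) (cur : List (Int × Int))
    (pdx pdy : Int) (a : Int × Int) : List (Int × Int) → List ((List (Int × Int)) × Int × Int)
  | [] => chunks ++ [(cur, pdx, pdy)]
  | b :: rest =>
      let dx := b.1 - a.1
      let dy := b.2 - a.2
      if dx = pdx ∧ dy = pdy then
        aLoop chunks (cur ++ [b]) pdx pdy b rest
      else
        aLoop (chunks ++ [(cur, pdx, pdy)]) [a, b] dx dy b rest

def separate_chunks (path : List (Int × Int)) : List ((List (Int × Int)) × Int × Int) :=
  match path with
  | [] => []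
  | [_] => []
  | p0 :: p1 :: rest =>
      aLoop [] [p0] (p1.1 - p0.1) (p1.2 - p0.2) p0 (p1 :: rest)

-- ===== PORT B =====
-- Source B's inner while loop: starting after point a, collect the maximal run of points whose
-- step from the previous point is (dx, dy); returns (collected points, last point, remainder).
def bRun (dx dy : Int) (a : Int × Int) : List (Int × Int) →
    (List (Int × Int)) × (Int × Int) × List (Int × Int)
  | [] => ([], a, [])
  | b :: rest =>
      if b.1 - a.1 = dx ∧ b.2 - a.2 = dy then
        let r := bRun dx dy b rest
        (b :: r.1, r.2.1, r.2.2)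
      else ([], a, b :: rest)

theorem bRun_rem_le (dx dy : Int) (a : Int × Int) (l : List (Int × Int)) :
    (bRun dx dy a l).2.2.length ≤ l.length := by
  induction l generalizing a with
  | nil => simp [bRun]
  | cons b rest ih =>
      simp only [bRun]
      split
      · exact le_trans (ih b) (Nat.le_succ _)
      · simp

-- Source B's outer while loop: one chunk per iteration, restarting at the run's last point.
def bGo (a : Int × Int) : List (Int × Int) → List ((List (Int × Int)) × Int × Int)
  | [] => []
  | b :: rest =>
      let dx := b.1 - a.1
      let dy := b.2 - a.2
      let r := bRun dx dy b rest
      (a :: b :: r.1, dx, dy) :: bGo r.2.1 r.2.2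
termination_by l => l.length
decreasing_by
  exact Nat.lt_succ_of_le (bRun_rem_le _ _ _ _)

def separate_chunks_alt (path : List (Int × Int)) : List ((List (Int × Int)) × Int × Int) :=
  match path with
  | [] => []
  | p0 :: rest => bGo p0 rest

-- ===== PRECONDITION & SPEC =====
def Spec_separate_chunks (path : List (Int × Int)) (out : List ((List (Int × Int)) × Int × Int)) : Prop := out = separate_chunks_alt path
instance (path : List (Int × Int)) (out : List ((List (Int × Int)) × Int × Int)) : Decidable (Spec_separate_chunks path out) := by unfold Spec_separate_chunks; infer_instance

-- ===== CLAIM (what is proved, stated in full; the proofs are below) =====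
def Claim_equal_separate_chunks : Prop := ∀ (path : List (Int × Int)), Dom_separate_chunks path → Spec_separate_chunks path (separate_chunks path)

-- ===== LEMMAS AND PROOFS =====

-- Invariant: A's accumulator loop, started with open chunk `cur` whose last point is `a` and
-- current direction (pdx, pdy), emits the accumulated chunks, then `cur` extended by the
-- maximal matching run, then exactly B's chunks for the remainder.
theorem aLoop_eq_bGo (rest : List (Int × Int)) :
    ∀ (chunks : List ((List (Int × Int)) × Int × Int)) (cur : List (Int × Int))
      (pdx pdy : Int) (a : Int × Int),
      aLoop chunks cur pdx pdy a rest =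
        chunks ++ ((cur ++ (bRun pdx pdy a rest).1, pdx, pdy) ::
          bGo (bRun pdx pdy a rest).2.1 (bRun pdx pdy a rest).2.2) := by
  induction rest with
  | nil => intro chunks cur pdx pdy a; simp [aLoop, bRun, bGo]
  | cons b rest ih =>
      intro chunks cur pdx pdy a
      simp only [aLoop, bRun]
      split
      · rw [ih]
        simp
      · rw [ih]
        simp [bGo]

theorem separate_chunks_spec' (path : List (Int × Int)) :
    separate_chunks path = separate_chunks_alt path := by
  match path with
  | [] => rfl
  | [_] => simp [separate_chunks, separate_chunks_alt, bGo]
  | p0 :: p1 :: rest =>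
      show aLoop [] [p0] (p1.1 - p0.1) (p1.2 - p0.2) p0 (p1 :: rest) = bGo p0 (p1 :: rest)
      rw [aLoop_eq_bGo]
      simp only [bRun, bGo]
      split
      · simp
      · next h => simp at h

-- ===== VERDICT (by name: the statement is the Claim_ definition above) =====
theorem separate_chunks_spec : Claim_equal_separate_chunks := by
  intro path _
  exact separate_chunks_spec' path
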